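-- pv_equiv track=rewrite | github.com/hnezado/Katas_Python | 6 kyu/fire_and_fury.py | fire_and_fury
-- ===== SOURCE A (Python) =====
-- def fire_and_fury(tweet):
-- 	cleaned_tweet = ''
-- 	for ind, c in enumerate(tweet):
-- 		if c not in 'EFIRUY': return 'Fake tweet.'
-- 		else:
-- 			if tweet[ind:ind+4] in ['FURY', 'FIRE']: cleaned_tweet += tweet[ind:ind+4]+' '
-- 	cleaned_tweet = cleaned_tweet.strip()
-- 	if cleaned_tweet:
-- 		if 'FIRE FIRE FIRE' in cleaned_tweet: cleaned_tweet = cleaned_tweet.replace('FIRE FIRE FIRE', 'You and you and you are fired!')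
-- 		cleaned_tweet = cleaned_tweet.replace('FIRE FIRE', 'You and you are fired!')
-- 		cleaned_tweet = cleaned_tweet.replace('FIRE', 'You are fired!')
-- 		cleaned_tweet = cleaned_tweet.replace('FURY FURY FURY', 'I am really really furious.')
-- 		cleaned_tweet = cleaned_tweet.replace('FURY FURY', 'I am really furious.')
-- 		cleaned_tweet = cleaned_tweet.replace('FURY', 'I am furious.')
-- 		return cleaned_tweet
-- 	else: return 'Fake tweet.'
-- ===== SOURCE B (Python) =====
-- def _phrase(t, n):
--     if t == 'FIRE':
--         return ['You are fired!', 'You and you are fired!',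
--                 'You and you and you are fired!'][n - 1]
--     return ['I am furious.', 'I am really furious.',
--             'I am really really furious.'][n - 1]
--
--
-- def fire_and_fury(tweet):
--     if any(c not in 'EFIRUY' for c in tweet):
--         return 'Fake tweet.'
--     tokens = []
--     i, n = 0, len(tweet)
--     while i < n:
--         t = tweet[i:i + 4]
--         if t in ('FIRE', 'FURY'):
--             tokens.append(t)
--             i += 4
--         else:
--             i += 1
--     if not tokens:
--         return 'Fake tweet.'
--     out = []
--     while tokens:
--         t = tokens[0]
--         run = 0
--         while run < len(tokens) and tokens[run] == t:
--             run += 1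
--         out += [_phrase(t, 3)] * (run // 3)
--         if run % 3:
--             out.append(_phrase(t, run % 3))
--         tokens = tokens[run:]
--     return ' '.join(out)
-- ===== Notes on version B (the rewrite author's own statement) =====
-- stated objective: alternative
-- what changed: B validates with a single any() pass, tokenizes FIRE/FURY in one left-to-right scan that consumes 4 chars per token, then converts each maximal run of equal tokens to phrases by run-length arithmetic (run//3 triple phrases plus one remainder phrase) and joins them, replacing A's per-index slice scan and its cascade of six global str.replace passes.
import Mathlib
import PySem

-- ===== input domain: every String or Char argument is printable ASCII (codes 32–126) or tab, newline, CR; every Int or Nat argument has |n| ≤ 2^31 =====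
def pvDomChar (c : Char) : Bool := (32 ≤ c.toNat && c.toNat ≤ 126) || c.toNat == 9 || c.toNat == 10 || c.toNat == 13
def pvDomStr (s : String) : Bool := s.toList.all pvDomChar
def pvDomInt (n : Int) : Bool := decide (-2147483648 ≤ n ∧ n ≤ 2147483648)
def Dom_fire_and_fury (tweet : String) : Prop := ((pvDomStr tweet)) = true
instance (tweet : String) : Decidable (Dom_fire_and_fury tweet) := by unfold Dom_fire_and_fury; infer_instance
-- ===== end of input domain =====

-- B replaces A's per-index slice scan plus six global str.replace passes by one tokenizing pass and
-- run-length arithmetic (run//3 triples, remainder phrase); objective: alternative (same behaviour, different algorithm).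

-- ===== PORT A =====
-- the for-loop of A: early `return 'Fake tweet.'` is modelled as `none`
def faf_loop (cs : List Char) (l : List (Int × Char)) (acc : List Char) : Option (List Char) :=
  match l with
  | [] => some acc
  | (ind, c) :: rest =>
    if PySem.Chars.isIn [c] "EFIRUY".toList = false then none
    else
      if PySem.List.slice cs (some ind) (some (ind + 4)) = "FURY".toList ∨
         PySem.List.slice cs (some ind) (some (ind + 4)) = "FIRE".toList then
        faf_loop cs rest (acc ++ (PySem.List.slice cs (some ind) (some (ind + 4)) ++ [' ']))
      else faf_loop cs rest acc

def fire_and_fury (tweet : String) : String :=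
  match faf_loop tweet.toList (PySem.List.enumerate tweet.toList 0) [] with
  | none => "Fake tweet."
  | some cleaned0 =>
    let ct := PySem.Chars.strip cleaned0
    if ct ≠ [] then
      let ct1 := if PySem.Chars.isIn "FIRE FIRE FIRE".toList ct then
          PySem.Chars.replace ct "FIRE FIRE FIRE".toList "You and you and you are fired!".toList else ct
      let ct2 := PySem.Chars.replace ct1 "FIRE FIRE".toList "You and you are fired!".toList
      let ct3 := PySem.Chars.replace ct2 "FIRE".toList "You are fired!".toList
      let ct4 := PySem.Chars.replace ct3 "FURY FURY FURY".toList "I am really really furious.".toList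
      let ct5 := PySem.Chars.replace ct4 "FURY FURY".toList "I am really furious.".toList
      let ct6 := PySem.Chars.replace ct5 "FURY".toList "I am furious.".toList
      String.ofList ct6
    else "Fake tweet."

-- ===== PORT B =====
-- any(c not in 'EFIRUY' for c in tweet)
def faf_valid (cs : List Char) : Bool := cs.any (fun c => !(PySem.Chars.isIn [c] "EFIRUY".toList))

-- the `while i < n` tokenizer: take the 4-char window, consume 4 on a token, else 1
def faf_tokenize : List Char → List (List Char)
  | [] => []
  | c :: t =>
    if (c :: t).take 4 = "FIRE".toList ∨ (c :: t).take 4 = "FURY".toList then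
      (c :: t).take 4 :: faf_tokenize (t.drop 3)
    else faf_tokenize t
termination_by l => l.length
decreasing_by
  all_goals (simp; try omega)

-- helper _phrase(t, n)
def faf_phrase (t : List Char) (n : Nat) : List Char :=
  if t = "FIRE".toList then
    PySem.List.pyGetD ["You are fired!".toList, "You and you are fired!".toList,
      "You and you and you are fired!".toList] ((n : Int) - 1) []
  else
    PySem.List.pyGetD ["I am furious.".toList, "I am really furious.".toList,
      "I am really really furious.".toList] ((n : Int) - 1) []

-- the inner `while run < len(tokens) and tokens[run] == t` counting loop
def faf_run (t : List Char) : List (List Char) → Nat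
  | [] => 0
  | x :: xs => if x = t then faf_run t xs + 1 else 0

theorem faf_run_cons_self (t : List Char) (xs : List (List Char)) :
    faf_run t (t :: xs) = faf_run t xs + 1 := by simp [faf_run]

-- the outer `while tokens` loop
def faf_out : List (List Char) → List (List Char)
  | [] => []
  | t :: rest =>
    (List.replicate (faf_run t (t :: rest) / 3) (faf_phrase t 3) ++
      (if faf_run t (t :: rest) % 3 ≠ 0 then [faf_phrase t (faf_run t (t :: rest) % 3)] else [])) ++
    faf_out ((t :: rest).drop (faf_run t (t :: rest)))
termination_by l => l.length
decreasing_by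
  simp [faf_run_cons_self]

def fire_and_fury_alt (tweet : String) : String :=
  if faf_valid tweet.toList then "Fake tweet."
  else
    if faf_tokenize tweet.toList = [] then "Fake tweet."
    else String.ofList (PySem.Chars.join [' '] (faf_out (faf_tokenize tweet.toList)))

-- ===== PRECONDITION & SPEC =====
def Spec_fire_and_fury (tweet : String) (out : String) : Prop := out = fire_and_fury_alt tweet
instance (tweet : String) (out : String) : Decidable (Spec_fire_and_fury tweet out) := by unfold Spec_fire_and_fury; infer_instance

-- ===== CLAIM (what is proved, stated in full; the proofs are below) =====
def Claim_equal_fire_and_fury : Prop := ∀ (tweet : String), Dom_fire_and_fury tweet → Spec_fire_and_fury tweet (fire_and_fury tweet)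

-- ===== LEMMAS AND PROOFS =====

-- ---- constants ----
def cFIRE : List Char := ['F','I','R','E']
def cFURY : List Char := ['F','U','R','Y']
def eF3 : List Char := "You and you and you are fired!".toList
def eF2 : List Char := "You and you are fired!".toList
def eF1 : List Char := "You are fired!".toList
def eU3 : List Char := "I am really really furious.".toList
def eU2 : List Char := "I am really furious.".toList
def eU1 : List Char := "I am furious.".toList

-- ---- item lists: tokens and already-produced English phrases, joined by single spaces ----
inductive Itm
  | tok : List Char → Itm
  | eng : List Char → Itm
deriving DecidableEq

def rend : Itm → List Char
  | .tok t => t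
  | .eng s => s

def wfI : Itm → Prop
  | .tok t => t = cFIRE ∨ t = cFURY
  | .eng s => 'F' ∉ s

def joinI : List Itm → List Char
  | [] => []
  | x :: xs => rend x ++ (if xs = [] then [] else ' ' :: joinI xs)

-- ---- a clean structural model of Python str.replace (for nonempty pattern) ----
def rep (old new : List Char) : List Char → List Char
  | [] => []
  | c :: t => if old <+: (c :: t) then new ++ rep old new (t.drop (old.length - 1))
              else c :: rep old new t
termination_by l => l.length
decreasing_by all_goals (simp; try omega)

theorem rep_nil (old new : List Char) : rep old new [] = [] := by simp [rep]

theorem rep_cons_pos (old new : List Char) (c : Char) (t : List Char) (h : old <+: (c :: t)) :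
    rep old new (c :: t) = new ++ rep old new (t.drop (old.length - 1)) := by
  rw [rep, if_pos h]

theorem rep_cons_neg (old new : List Char) (c : Char) (t : List Char) (h : ¬ old <+: (c :: t)) :
    rep old new (c :: t) = c :: rep old new t := by
  rw [rep, if_neg h]

theorem rep_go_eq (old new : List Char) (hold : old ≠ []) :
    ∀ (fuel : Nat) (l acc : List Char), l.length ≤ fuel →
      PySem.Chars.replace.go old new fuel l acc = acc.reverse ++ rep old new l := by
  intro fuel
  induction fuel with
  | zero =>
    intro l acc h
    have hl : l = [] := by
      cases l with
      | nil => rfl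
      | cons c t => simp at h
    subst hl
    rw [PySem.Chars.replace.go]
    simp [rep]
  | succ m ih =>
    intro l acc h
    cases l with
    | nil =>
      rw [PySem.Chars.replace.go]
      · simp [rep]
      · omega
    | cons c t =>
      rw [PySem.Chars.replace.go]
      by_cases hp : old <+: (c :: t)
      · rw [if_pos (List.isPrefixOf_iff_prefix.mpr hp)]
        obtain ⟨o, ot, rfl⟩ : ∃ o ot, old = o :: ot := by
          cases old with
          | nil => exact absurd rfl hold
          | cons o ot => exact ⟨o, ot, rfl⟩
        have hdrop : List.drop (o :: ot).length (c :: t) = t.drop ((o :: ot).length - 1) := by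
          simp
        rw [hdrop, ih _ _ (by simp at h ⊢; omega)]
        rw [rep_cons_pos _ _ _ _ hp]
        simp
      · rw [if_neg (by simpa using (fun hc => hp (List.isPrefixOf_iff_prefix.mp hc)))]
        rw [ih _ _ (by simp at h ⊢; omega)]
        rw [rep_cons_neg _ _ _ _ hp]
        simp

theorem replace_eq_rep (old new s : List Char) (hold : old ≠ []) :
    PySem.Chars.replace s old new = rep old new s := by
  rw [PySem.Chars.replace]
  rw [if_neg (by simpa using hold)]
  simpa using rep_go_eq old new hold s.length s [] le_rfl

theorem rep_app (old new : List Char) (hold : old ≠ []) (T : List Char) :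
    rep old new (old ++ T) = new ++ rep old new T := by
  obtain ⟨o, ot, rfl⟩ : ∃ o ot, old = o :: ot := by
    cases old with
    | nil => exact absurd rfl hold
    | cons o ot => exact ⟨o, ot, rfl⟩
  rw [show (o :: ot) ++ T = o :: (ot ++ T) by simp]
  rw [rep_cons_pos _ _ _ _ (by exact ⟨T, by simp⟩)]
  congr 1
  congr 1
  simpa using List.drop_left ot T

theorem rep_noF (old new : List Char) (o' : List Char) (hold : old = 'F' :: o') :
    ∀ (a b : List Char), (∀ c ∈ a, c ≠ 'F') → rep old new (a ++ b) = a ++ rep old new b := by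
  intro a
  induction a with
  | nil => intro b _; simp
  | cons c a' ih =>
    intro b hF
    have hc : c ≠ 'F' := hF c (by simp)
    have hnp : ¬ old <+: (c :: (a' ++ b)) := by
      subst hold
      rw [List.cons_prefix_cons]
      rintro ⟨h1, -⟩
      exact hc h1.symm
    rw [show (c :: a') ++ b = c :: (a' ++ b) by simp]
    rw [rep_cons_neg _ _ _ _ hnp, ih b (fun x hx => hF x (by simp [hx]))]
    simp

theorem rep_id (old new : List Char) (l : List Char) (h : ¬ old <:+: l) :
    rep old new l = l := by
  induction l with
  | nil => simp [rep]
  | cons c t ih =>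
    have hnp : ¬ old <+: (c :: t) := fun hp => h hp.isInfix
    rw [rep_cons_neg _ _ _ _ hnp, ih (fun hi => h (hi.trans ⟨[c], [], by simp⟩))]

-- ---- joinI facts ----
theorem joinI_cons (x : Itm) (xs : List Itm) :
    joinI (x :: xs) = rend x ++ (if xs = [] then [] else ' ' :: joinI xs) := by
  rw [joinI]

theorem joinI_append (a b : List Itm) (ha : a ≠ []) :
    joinI (a ++ b) = joinI a ++ (if b = [] then [] else ' ' :: joinI b) := by
  induction a with
  | nil => exact absurd rfl ha
  | cons x a' ih =>
    cases a' with
    | nil =>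
      simp only [List.nil_append, List.cons_append, joinI_cons]
      simp
    | cons y a'' =>
      rw [List.cons_append, joinI_cons, ih (by simp)]
      rw [show joinI (x :: y :: a'') = rend x ++ ' ' :: joinI (y :: a'') from by
        rw [joinI_cons]; simp]
      simp

def patN (tv : List Char) (n : Nat) : List Char := joinI (List.replicate n (Itm.tok tv))

theorem patN_succ (tv : List Char) (m : Nat) (hm : 1 ≤ m) :
    patN tv (m + 1) = tv ++ ' ' :: patN tv m := by
  rw [patN, List.replicate_succ, joinI_cons, if_neg (by simp; omega)]
  rfl

theorem pat_head (tv : List Char) (htv : tv = cFIRE ∨ tv = cFURY) (n : Nat) (hn : 1 ≤ n) :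
    ∃ p', patN tv n = 'F' :: p' := by
  obtain ⟨m, rfl⟩ : ∃ m, n = m + 1 := ⟨n - 1, by omega⟩
  rw [patN, List.replicate_succ, joinI_cons]
  rcases htv with h | h <;> subst h
  · exact ⟨'I' :: 'R' :: 'E' ::
      (if List.replicate m (Itm.tok cFIRE) = [] then []
       else ' ' :: joinI (List.replicate m (Itm.tok cFIRE))), by simp [rend, cFIRE]⟩
  · exact ⟨'U' :: 'R' :: 'Y' ::
      (if List.replicate m (Itm.tok cFURY) = [] then []
       else ' ' :: joinI (List.replicate m (Itm.tok cFURY))), by simp [rend, cFURY]⟩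

-- the pattern (n ≥ 1 joined copies of a token) occurs at the head of a joined
-- well-formed item list only when the item list itself starts with n copies of the token
theorem noCross (tv : List Char) (htv : tv = cFIRE ∨ tv = cFURY) :
    ∀ (n : Nat), 1 ≤ n → ∀ (xs : List Itm), (∀ x ∈ xs, wfI x) →
      ¬ (List.replicate n (Itm.tok tv) <+: xs) → ¬ (patN tv n <+: joinI xs) := by
  intro n
  induction n with
  | zero => intro hn; exact absurd hn (by omega)
  | succ m ih =>
    intro hn xs hwf hnp hp
    obtain ⟨p', hpat⟩ := pat_head tv htv (m + 1) (by omega)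
    cases xs with
    | nil =>
      rw [show joinI [] = [] from rfl, hpat] at hp
      exact absurd (List.prefix_nil.mp hp) (by simp)
    | cons x rest =>
      cases x with
      | eng s =>
        have hs : 'F' ∉ s := by
          have := hwf (Itm.eng s) (by simp)
          simpa [wfI] using this
        rw [hpat, joinI_cons] at hp
        cases s with
        | nil =>
          simp only [rend, List.nil_append] at hp
          by_cases hr : rest = []
          · subst hr; simp at hp
          · rw [if_neg hr, List.cons_prefix_cons] at hp
            simp at hp
        | cons c s' =>
          simp only [rend, List.cons_append] at hp
          rw [List.cons_prefix_cons] at hp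
          exact hs (by rw [← hp.1]; simp)
      | tok u =>
        have hu := hwf (Itm.tok u) (by simp)
        by_cases hut : u = tv
        · subst hut
          cases m with
          | zero => exact hnp ⟨rest, by simp⟩
          | succ m' =>
            have hm1 : 1 ≤ m' + 1 := by omega
            have hrest : ¬ List.replicate (m' + 1) (Itm.tok u) <+: rest := by
              intro hr; apply hnp
              rw [List.replicate_succ, List.cons_prefix_cons]
              exact ⟨rfl, hr⟩
            rw [patN_succ u (m' + 1) hm1, joinI_cons] at hp
            simp only [rend] at hp
            rw [List.prefix_append_right_inj] at hp
            by_cases hr : rest = []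
            · subst hr; simp at hp
            · rw [if_neg hr, List.cons_prefix_cons] at hp
              exact ih hm1 rest (fun y hy => hwf y (by simp [hy])) hrest hp.2
        · rw [patN, List.replicate_succ, joinI_cons, joinI_cons] at hp
          simp only [rend] at hp
          rcases htv with h1 | h1 <;> rcases hu with h2 | h2 <;> subst h1 <;> subst h2 <;>
            first
              | exact hut rfl
              | (simp only [cFIRE, cFURY, List.cons_append, List.cons_prefix_cons] at hp
                 exact absurd hp.2.1 (by decide))

-- ---- item-level model of one global replace pass ----
def passI (tk : Itm) (n : Nat) (e : List Char) : List Itm → List Itm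
  | [] => []
  | x :: xs => if List.replicate n tk <+: (x :: xs) then Itm.eng e :: passI tk n e (xs.drop (n - 1))
               else x :: passI tk n e xs
termination_by l => l.length
decreasing_by all_goals (simp; try omega)

theorem passI_nil (tk : Itm) (n : Nat) (e : List Char) : passI tk n e [] = [] := by simp [passI]

theorem passI_cons_pos (tk : Itm) (n : Nat) (e : List Char) (x : Itm) (xs : List Itm)
    (h : List.replicate n tk <+: (x :: xs)) :
    passI tk n e (x :: xs) = Itm.eng e :: passI tk n e (xs.drop (n - 1)) := by
  rw [passI, if_pos h]

theorem passI_cons_neg (tk : Itm) (n : Nat) (e : List Char) (x : Itm) (xs : List Itm)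
    (h : ¬ List.replicate n tk <+: (x :: xs)) :
    passI tk n e (x :: xs) = x :: passI tk n e xs := by
  rw [passI, if_neg h]

theorem passI_ne_nil (tk : Itm) (n : Nat) (e : List Char) (x : Itm) (xs : List Itm) :
    passI tk n e (x :: xs) ≠ [] := by
  rw [passI]; split <;> simp

-- one replace pass on the joined string is the item-level pass
set_option maxRecDepth 65536 in
theorem pass_correct (tv : List Char) (htv : tv = cFIRE ∨ tv = cFURY) (n : Nat) (hn : 1 ≤ n)
    (e : List Char) :
    ∀ (xs : List Itm), (∀ x ∈ xs, wfI x) →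
      rep (patN tv n) e (joinI xs) = joinI (passI (Itm.tok tv) n e xs) := by
  have main : ∀ (N : Nat) (xs : List Itm), xs.length ≤ N → (∀ x ∈ xs, wfI x) →
      rep (patN tv n) e (joinI xs) = joinI (passI (Itm.tok tv) n e xs) := by
    intro N
    induction N with
    | zero =>
      intro xs h _
      have hx : xs = [] := by cases xs with | nil => rfl | cons a b => simp at h
      subst hx
      rw [show joinI [] = [] from rfl, rep_nil, passI_nil]
      rfl
    | succ N ih =>
      intro xs hlen hwf
      obtain ⟨p', hpat⟩ := pat_head tv htv n hn
      have hpne : patN tv n ≠ [] := by rw [hpat]; simp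
      have hsp : ∀ (l : List Char), ¬ patN tv n <+: (' ' :: l) := by
        intro l hc
        rw [hpat, List.cons_prefix_cons] at hc
        simpa using hc.1
      cases xs with
      | nil =>
        rw [show joinI [] = [] from rfl, rep_nil, passI_nil]
        rfl
      | cons x rest =>
        by_cases hpre : List.replicate n (Itm.tok tv) <+: (x :: rest)
        · obtain ⟨rest₂, hdec⟩ := hpre
          have hpre' : List.replicate n (Itm.tok tv) <+: (x :: rest) := ⟨rest₂, hdec⟩
          have hrep_ne : List.replicate n (Itm.tok tv) ≠ [] := by simp; omega
          obtain ⟨m, hm⟩ : ∃ m, n = m + 1 := ⟨n - 1, by omega⟩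
          have hrest_eq : rest = List.replicate m (Itm.tok tv) ++ rest₂ := by
            have h := hdec
            rw [hm, List.replicate_succ, List.cons_append] at h
            exact (((List.cons.injEq _ _ _ _).mp h).2).symm
          have hdrop : rest.drop (n - 1) = rest₂ := by
            rw [hrest_eq, hm]
            simpa using List.drop_left (List.replicate m (Itm.tok tv)) rest₂
          have hlen2 : rest₂.length ≤ N := by
            have h1 : rest.length ≤ N := by simpa using hlen
            have h2 : rest₂.length ≤ rest.length := by
              rw [hrest_eq]; simp
            omega
          have hwf2 : ∀ y ∈ rest₂, wfI y := by
            intro y hy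
            exact hwf y (by rw [← hdec]; exact List.mem_append_right _ hy)
          rw [passI_cons_pos _ _ _ _ _ hpre', hdrop]
          rw [← hdec, joinI_append _ _ hrep_ne]
          rw [show joinI (List.replicate n (Itm.tok tv)) = patN tv n from rfl]
          by_cases hr2 : rest₂ = []
          · subst hr2
            rw [if_pos rfl, rep_app _ _ hpne, rep_nil, passI_nil]
            simp [joinI, rend]
          · rw [if_neg hr2, rep_app _ _ hpne, rep_cons_neg _ _ _ _ (hsp _),
              ih rest₂ hlen2 hwf2]
            have hpne2 : passI (Itm.tok tv) n e rest₂ ≠ [] := by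
              cases rest₂ with
              | nil => exact absurd rfl hr2
              | cons y ys => exact passI_ne_nil _ _ _ _ _
            rw [joinI_cons, if_neg hpne2]
            simp [rend]
        · rw [passI_cons_neg _ _ _ _ _ hpre]
          have hlen1 : rest.length ≤ N := by simpa using hlen
          have hwf1 : ∀ y ∈ rest, wfI y := fun y hy => hwf y (by simp [hy])
          have hih := ih rest hlen1 hwf1
          have htail : ∀ (pre : List Char),
              rep (patN tv n) e (pre ++ (if rest = [] then [] else ' ' :: joinI rest)) =
                pre ++ (if rest = [] then [] else ' ' :: joinI (passI (Itm.tok tv) n e rest)) →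
              rep (patN tv n) e (joinI (x :: rest)) = joinI (x :: passI (Itm.tok tv) n e rest) →
              True := fun _ _ _ => trivial
          clear htail
          have hifs : (if passI (Itm.tok tv) n e rest = [] then ([] : List Char)
              else ' ' :: joinI (passI (Itm.tok tv) n e rest)) =
              (if rest = [] then [] else ' ' :: joinI (passI (Itm.tok tv) n e rest)) := by
            cases rest with
            | nil => rw [passI_nil]
            | cons y ys =>
              rw [if_neg (passI_ne_nil _ _ _ _ _), if_neg (by simp)]
          rw [joinI_cons, joinI_cons, hifs]
          have hreptail : rep (patN tv n) e (if rest = [] then [] else ' ' :: joinI rest) =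
              (if rest = [] then [] else ' ' :: joinI (passI (Itm.tok tv) n e rest)) := by
            cases hre : rest with
            | nil => rw [if_pos rfl, if_pos rfl, rep_nil]
            | cons y ys =>
              rw [if_neg (by simp), if_neg (by simp), rep_cons_neg _ _ _ _ (hsp _), ← hre, hih]
          cases x with
          | eng s =>
            have hs : 'F' ∉ s := by
              have := hwf (Itm.eng s) (by simp)
              simpa [wfI] using this
            simp only [rend]
            rw [rep_noF _ _ _ hpat s _ (fun c hc => by rintro rfl; exact hs hc), hreptail]
          | tok u =>
            have hu := hwf (Itm.tok u) (by simp)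
            have hnc : ¬ patN tv n <+: joinI (Itm.tok u :: rest) :=
              noCross tv htv n hn _ hwf hpre
            rw [joinI_cons] at hnc
            simp only [rend] at hnc ⊢
            rcases hu with h2 | h2 <;> subst h2
            · have hsplit : cFIRE ++ (if rest = [] then [] else ' ' :: joinI rest) =
                  'F' :: (['I','R','E'] ++ (if rest = [] then [] else ' ' :: joinI rest)) := by
                simp [cFIRE]
              rw [hsplit]
              have hnc' : ¬ patN tv n <+:
                  'F' :: (['I','R','E'] ++ (if rest = [] then [] else ' ' :: joinI rest)) := by
                rw [← hsplit]; exact hnc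
              rw [rep_cons_neg _ _ _ _ hnc',
                rep_noF _ _ _ hpat ['I','R','E'] _ (by intro c hc; fin_cases hc <;> decide),
                hreptail]
              simp [cFIRE]
            · have hsplit : cFURY ++ (if rest = [] then [] else ' ' :: joinI rest) =
                  'F' :: (['U','R','Y'] ++ (if rest = [] then [] else ' ' :: joinI rest)) := by
                simp [cFURY]
              rw [hsplit]
              have hnc' : ¬ patN tv n <+:
                  'F' :: (['U','R','Y'] ++ (if rest = [] then [] else ' ' :: joinI rest)) := by
                rw [← hsplit]; exact hnc
              rw [rep_cons_neg _ _ _ _ hnc',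
                rep_noF _ _ _ hpat ['U','R','Y'] _ (by intro c hc; fin_cases hc <;> decide),
                hreptail]
              simp [cFURY]
  intro xs hwf
  exact main xs.length xs le_rfl hwf

theorem wf_passI (tk : Itm) (n : Nat) (e : List Char) (he : 'F' ∉ e) :
    ∀ (xs : List Itm), (∀ x ∈ xs, wfI x) → ∀ x ∈ passI tk n e xs, wfI x := by
  have main : ∀ (N : Nat) (xs : List Itm), xs.length ≤ N → (∀ x ∈ xs, wfI x) →
      ∀ x ∈ passI tk n e xs, wfI x := by
    intro N
    induction N with
    | zero =>
      intro xs h _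
      have hx : xs = [] := by cases xs with | nil => rfl | cons a b => simp at h
      subst hx
      rw [passI_nil]; simp
    | succ N ih =>
      intro xs hlen hwf
      cases xs with
      | nil => rw [passI_nil]; simp
      | cons q rest =>
        by_cases hpre : List.replicate n tk <+: (q :: rest)
        · rw [passI_cons_pos _ _ _ _ _ hpre]
          intro w hw
          rcases List.mem_cons.mp hw with h | h
          · subst h; exact he
          · exact ih (rest.drop (n - 1)) (by simp at hlen ⊢; omega)
              (fun z hz => hwf z (by simp [List.mem_of_mem_drop hz])) w h
        · rw [passI_cons_neg _ _ _ _ _ hpre]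
          intro w hw
          rcases List.mem_cons.mp hw with h | h
          · exact hwf w (by rw [h]; simp)
          · exact ih rest (by simpa using hlen) (fun z hz => hwf z (by simp [hz])) w h
  intro xs hwf
  exact main xs.length xs le_rfl hwf

-- ---- run-level behaviour of passI ----
theorem passI_skip (tk : Itm) (n : Nat) (hn : 1 ≤ n) (e : List Char) :
    ∀ (a b : List Itm), tk ∉ a → passI tk n e (a ++ b) = a ++ passI tk n e b := by
  intro a
  induction a with
  | nil => intro b _; simp
  | cons x a' ih =>
    intro b hx
    obtain ⟨m, rfl⟩ : ∃ m, n = m + 1 := ⟨n - 1, by omega⟩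
    have hnp : ¬ List.replicate (m + 1) tk <+: (x :: (a' ++ b)) := by
      intro hc
      rw [List.replicate_succ, List.cons_prefix_cons] at hc
      exact hx (by rw [hc.1]; simp)
    rw [List.cons_append, passI_cons_neg _ _ _ _ _ hnp, ih b (fun hc => hx (by simp [hc]))]
    simp

theorem noRun (tk : Itm) : ∀ (r n : Nat) (b : List Itm), r < n →
    (∀ y, b.head? = some y → y ≠ tk) →
    ¬ (List.replicate n tk <+: List.replicate r tk ++ b) := by
  intro r
  induction r with
  | zero =>
    intro n b h hb hp
    obtain ⟨m, rfl⟩ : ∃ m, n = m + 1 := ⟨n - 1, by omega⟩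
    rw [List.replicate_succ] at hp
    simp only [List.replicate_zero, List.nil_append] at hp
    cases b with
    | nil => simpa using List.prefix_nil.mp hp
    | cons y ys =>
      rw [List.cons_prefix_cons] at hp
      exact hb y rfl hp.1.symm
  | succ r ih =>
    intro n b h hb hp
    obtain ⟨m, rfl⟩ : ∃ m, n = m + 1 := ⟨n - 1, by omega⟩
    rw [List.replicate_succ, List.replicate_succ, List.cons_append,
      List.cons_prefix_cons] at hp
    exact ih m b (by omega) hb hp.2

theorem passI_run (tk : Itm) (n : Nat) (hn : 1 ≤ n) (e : List Char) :
    ∀ (r : Nat) (b : List Itm), (∀ y, b.head? = some y → y ≠ tk) →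
      passI tk n e (List.replicate r tk ++ b) =
        List.replicate (r / n) (Itm.eng e) ++ (List.replicate (r % n) tk ++ passI tk n e b) := by
  intro r
  induction r using Nat.strong_induction_on with
  | _ r ih =>
    intro b hb
    by_cases hrn : n ≤ r
    · obtain ⟨r', rfl⟩ : ∃ r', r = r' + 1 := ⟨r - 1, by omega⟩
      have hshape : List.replicate (r' + 1) tk ++ b = tk :: (List.replicate r' tk ++ b) := by
        rw [List.replicate_succ, List.cons_append]
      have hpre : List.replicate n tk <+: tk :: (List.replicate r' tk ++ b) := by
        rw [← hshape]
        refine ⟨List.replicate (r' + 1 - n) tk ++ b, ?_⟩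
        rw [← List.append_assoc, ← List.replicate_add]
        congr 2
        omega
      rw [hshape, passI_cons_pos _ _ _ _ _ hpre]
      have hdrop : (List.replicate r' tk ++ b).drop (n - 1) =
          List.replicate (r' + 1 - n) tk ++ b := by
        rw [List.drop_append_of_le_length (by simp; omega), List.drop_replicate]
        congr 2
        omega
      rw [hdrop, ih (r' + 1 - n) (by omega) b hb]
      rw [Nat.div_eq_sub_div (by omega) hrn, Nat.mod_eq_sub_mod hrn]
      rw [List.replicate_succ]
      simp
    · cases r with
      | zero => simp
      | succ r' =>
        have hshape : List.replicate (r' + 1) tk ++ b = tk :: (List.replicate r' tk ++ b) := by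
          rw [List.replicate_succ, List.cons_append]
        have hnp : ¬ List.replicate n tk <+: tk :: (List.replicate r' tk ++ b) := by
          rw [← hshape]
          exact noRun tk (r' + 1) n b (by omega) hb
        rw [hshape, passI_cons_neg _ _ _ _ _ hnp, ih r' (by omega) b hb]
        rw [Nat.div_eq_of_lt (by omega), Nat.div_eq_of_lt (by omega),
          Nat.mod_eq_of_lt (by omega), Nat.mod_eq_of_lt (by omega)]
        rw [List.replicate_succ]
        simp

theorem head_passI_ne (tk tk₂ : Itm) (n : Nat) (e : List Char) (htk₂ : ∀ s, tk₂ ≠ Itm.eng s)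
    (xs : List Itm) (h : ∀ y, xs.head? = some y → y ≠ tk₂) :
    ∀ y, (passI tk n e xs).head? = some y → y ≠ tk₂ := by
  intro y hy
  cases xs with
  | nil => rw [passI_nil] at hy; simp at hy
  | cons x xs' =>
    by_cases hpre : List.replicate n tk <+: (x :: xs')
    · rw [passI_cons_pos _ _ _ _ _ hpre] at hy
      simp only [List.head?_cons, Option.some.injEq] at hy
      subst hy
      exact fun hc => htk₂ e hc.symm
    · rw [passI_cons_neg _ _ _ _ _ hpre] at hy
      simp only [List.head?_cons, Option.some.injEq] at hy
      exact hy ▸ h x rfl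

-- ---- the six passes on a token list give exactly B's run expansion ----
def chainI (xs : List Itm) : List Itm :=
  passI (.tok cFURY) 1 eU1 (passI (.tok cFURY) 2 eU2 (passI (.tok cFURY) 3 eU3
    (passI (.tok cFIRE) 1 eF1 (passI (.tok cFIRE) 2 eF2 (passI (.tok cFIRE) 3 eF3 xs)))))

theorem faf_out_nil : faf_out [] = [] := by rw [faf_out]

theorem faf_out_cons (t : List Char) (rest : List (List Char)) :
    faf_out (t :: rest) =
      (List.replicate (faf_run t (t :: rest) / 3) (faf_phrase t 3) ++
        (if faf_run t (t :: rest) % 3 ≠ 0 then [faf_phrase t (faf_run t (t :: rest) % 3)] else [])) ++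
      faf_out ((t :: rest).drop (faf_run t (t :: rest))) := by rw [faf_out]

theorem tripleStep (tv : List Char) (e3 e2 e1 : List Char) (r : Nat) (b : List Itm)
    (hb : ∀ y, b.head? = some y → y ≠ Itm.tok tv) :
    passI (.tok tv) 1 e1 (passI (.tok tv) 2 e2 (passI (.tok tv) 3 e3
        (List.replicate r (Itm.tok tv) ++ b))) =
      (List.replicate (r / 3) (Itm.eng e3) ++
        (if r % 3 = 2 then [Itm.eng e2] else if r % 3 = 1 then [Itm.eng e1] else [])) ++
      passI (.tok tv) 1 e1 (passI (.tok tv) 2 e2 (passI (.tok tv) 3 e3 b)) := by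
  have hb3 := head_passI_ne (.tok tv) (.tok tv) 3 e3 (by simp) b hb
  have hb23 := head_passI_ne (.tok tv) (.tok tv) 2 e2 (by simp) _ hb3
  rw [passI_run _ 3 (by omega) e3 r b hb]
  rw [passI_skip _ 2 (by omega) e2 (List.replicate (r / 3) (Itm.eng e3)) _
    (by intro hc; exact absurd (List.eq_of_mem_replicate hc) (by simp))]
  rw [passI_run _ 2 (by omega) e2 (r % 3) _ hb3]
  rw [passI_skip _ 1 (by omega) e1 (List.replicate (r / 3) (Itm.eng e3)) _
    (by intro hc; exact absurd (List.eq_of_mem_replicate hc) (by simp))]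
  rw [passI_skip _ 1 (by omega) e1 (List.replicate (r % 3 / 2) (Itm.eng e2)) _
    (by intro hc; exact absurd (List.eq_of_mem_replicate hc) (by simp))]
  rw [passI_run _ 1 (by omega) e1 (r % 3 % 2) _ hb23]
  have h3 : r % 3 = 0 ∨ r % 3 = 1 ∨ r % 3 = 2 := by omega
  rcases h3 with h | h | h <;> rw [h] <;> norm_num

theorem run_decomp (t : List Char) :
    ∀ (l : List (List Char)), l = List.replicate (faf_run t l) t ++ l.drop (faf_run t l) ∧
      (∀ y, (l.drop (faf_run t l)).head? = some y → y ≠ t) := by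
  intro l
  induction l with
  | nil => simp [faf_run]
  | cons x xs ih =>
    by_cases hx : x = t
    · subst hx
      rw [faf_run_cons_self]
      constructor
      · rw [List.replicate_succ, List.cons_append, List.drop_succ_cons]
        exact congrArg _ ih.1
      · rw [List.drop_succ_cons]
        exact ih.2
    · rw [show faf_run t (x :: xs) = 0 by simp [faf_run, hx]]
      constructor
      · simp
      · intro y hy
        simp only [List.drop_zero, List.head?_cons, Option.some.injEq] at hy
        exact hy ▸ hx

theorem phrase_F3 : faf_phrase cFIRE 3 = eF3 := by decide
theorem phrase_F2 : faf_phrase cFIRE 2 = eF2 := by decide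
theorem phrase_F1 : faf_phrase cFIRE 1 = eF1 := by decide
theorem phrase_U3 : faf_phrase cFURY 3 = eU3 := by decide
theorem phrase_U2 : faf_phrase cFURY 2 = eU2 := by decide
theorem phrase_U1 : faf_phrase cFURY 1 = eU1 := by decide

theorem chain_run (ts : List (List Char)) (hts : ∀ t ∈ ts, t = cFIRE ∨ t = cFURY) :
    chainI (ts.map Itm.tok) = (faf_out ts).map Itm.eng := by
  have main : ∀ (N : Nat) (ts : List (List Char)), ts.length ≤ N →
      (∀ t ∈ ts, t = cFIRE ∨ t = cFURY) →
      chainI (ts.map Itm.tok) = (faf_out ts).map Itm.eng := by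
    intro N
    induction N with
    | zero =>
      intro ts h _
      have hx : ts = [] := by cases ts with | nil => rfl | cons a b => simp at h
      subst hx
      simp [chainI, passI_nil, faf_out_nil]
    | succ N ih =>
      intro ts hlen hwf
      cases ts with
      | nil => simp [chainI, passI_nil, faf_out_nil]
      | cons t rest =>
        have ht := hwf t (by simp)
        have hr1 : 1 ≤ faf_run t (t :: rest) := by rw [faf_run_cons_self]; omega
        obtain ⟨hdec, hhead⟩ := run_decomp t (t :: rest)
        have hlenD : ((t :: rest).drop (faf_run t (t :: rest))).length ≤ N := by
          simp at hlen ⊢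
          omega
        have hwfD : ∀ x ∈ (t :: rest).drop (faf_run t (t :: rest)), x = cFIRE ∨ x = cFURY :=
          fun x hx => hwf x (List.mem_of_mem_drop hx)
        have hmap : (t :: rest).map Itm.tok =
            List.replicate (faf_run t (t :: rest)) (Itm.tok t) ++
              ((t :: rest).drop (faf_run t (t :: rest))).map Itm.tok := by
          conv_lhs => rw [hdec]
          rw [List.map_append, List.map_replicate]
        have hheadD : ∀ y, (((t :: rest).drop (faf_run t (t :: rest))).map Itm.tok).head? =
            some y → y ≠ Itm.tok t := by
          intro y hy
          rw [List.head?_map] at hy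
          cases hD0 : ((t :: rest).drop (faf_run t (t :: rest))).head? with
          | none => rw [hD0] at hy; simp at hy
          | some d0 =>
            rw [hD0] at hy
            simp only [Option.map_some, Option.some.injEq] at hy
            have hd0 := hhead d0 hD0
            rw [← hy]
            simp [hd0]
        have hIH := ih _ hlenD hwfD
        rw [faf_out_cons]
        rcases ht with h | h <;> subst h
        · simp only [chainI]
          rw [hmap, tripleStep cFIRE eF3 eF2 eF1 _ _ hheadD]
          rw [passI_skip _ 3 (by omega) eU3 _ _ ?hE, passI_skip _ 2 (by omega) eU2 _ _ ?hE2,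
            passI_skip _ 1 (by omega) eU1 _ _ ?hE3]
          case hE | hE2 | hE3 =>
            intro hc
            rcases List.mem_append.mp hc with hc | hc
            · exact absurd (List.eq_of_mem_replicate hc) (by simp)
            · split at hc <;> simp at hc
          rw [show passI (Itm.tok cFURY) 1 eU1 (passI (Itm.tok cFURY) 2 eU2
              (passI (Itm.tok cFURY) 3 eU3 (passI (Itm.tok cFIRE) 1 eF1
                (passI (Itm.tok cFIRE) 2 eF2 (passI (Itm.tok cFIRE) 3 eF3
                  (((cFIRE :: rest).drop (faf_run cFIRE (cFIRE :: rest))).map Itm.tok)))))) =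
              chainI (((cFIRE :: rest).drop (faf_run cFIRE (cFIRE :: rest))).map Itm.tok)
            from rfl, hIH]
          rw [List.map_append, List.map_append, List.map_replicate, phrase_F3]
          congr 2
          have h3 : faf_run cFIRE (cFIRE :: rest) % 3 = 0 ∨
              faf_run cFIRE (cFIRE :: rest) % 3 = 1 ∨
              faf_run cFIRE (cFIRE :: rest) % 3 = 2 := by omega
          rcases h3 with h | h | h <;> rw [h] <;> simp [phrase_F2, phrase_F1]
        · simp only [chainI]
          rw [hmap]
          rw [passI_skip _ 3 (by omega) eF3 _ _ ?hF, passI_skip _ 2 (by omega) eF2 _ _ ?hF2,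
            passI_skip _ 1 (by omega) eF1 _ _ ?hF3]
          case hF | hF2 | hF3 =>
            intro hc
            have := List.eq_of_mem_replicate hc
            simp [cFIRE, cFURY] at this
          have h3 := head_passI_ne (.tok cFIRE) (.tok cFURY) 3 eF3 (by simp) _ hheadD
          have h2 := head_passI_ne (.tok cFIRE) (.tok cFURY) 2 eF2 (by simp) _ h3
          have h1 := head_passI_ne (.tok cFIRE) (.tok cFURY) 1 eF1 (by simp) _ h2
          rw [tripleStep cFURY eU3 eU2 eU1 _ _ h1]
          rw [show passI (Itm.tok cFURY) 1 eU1 (passI (Itm.tok cFURY) 2 eU2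
              (passI (Itm.tok cFURY) 3 eU3 (passI (Itm.tok cFIRE) 1 eF1
                (passI (Itm.tok cFIRE) 2 eF2 (passI (Itm.tok cFIRE) 3 eF3
                  (((cFURY :: rest).drop (faf_run cFURY (cFURY :: rest))).map Itm.tok)))))) =
              chainI (((cFURY :: rest).drop (faf_run cFURY (cFURY :: rest))).map Itm.tok)
            from rfl, hIH]
          rw [List.map_append, List.map_append, List.map_replicate, phrase_U3]
          congr 2
          have h3 : faf_run cFURY (cFURY :: rest) % 3 = 0 ∨
              faf_run cFURY (cFURY :: rest) % 3 = 1 ∨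
              faf_run cFURY (cFURY :: rest) % 3 = 2 := by omega
          rcases h3 with h | h | h <;> rw [h] <;> simp [phrase_U2, phrase_U1]
  exact main ts.length ts le_rfl hts

-- ---- A's scanning loop ----
def scanA : List Char → List Char
  | [] => []
  | c :: t =>
    (if (c :: t).take 4 = "FURY".toList ∨ (c :: t).take 4 = "FIRE".toList
     then (c :: t).take 4 ++ [' '] else []) ++ scanA t

def flatTok : List (List Char) → List Char
  | [] => []
  | t :: ts => t ++ ' ' :: flatTok ts

theorem tFIRE : "FIRE".toList = cFIRE := rfl
theorem tFURY : "FURY".toList = cFURY := rfl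

theorem loop_none (cs : List Char) :
    ∀ (suf : List Char) (k : Int) (acc : List Char),
      (∃ c ∈ suf, PySem.Chars.isIn [c] "EFIRUY".toList = false) →
      faf_loop cs (PySem.List.enumerate suf k) acc = none := by
  intro suf
  induction suf with
  | nil => rintro k acc ⟨c, hc, -⟩; simp at hc
  | cons c t ih =>
    rintro k acc ⟨c', hc', hbad⟩
    rw [PySem.List.enumerate_cons, faf_loop]
    rcases List.mem_cons.mp hc' with h | h
    · subst h
      rw [if_pos hbad]
    · by_cases hc : PySem.Chars.isIn [c] "EFIRUY".toList = false
      · rw [if_pos hc]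
      · rw [if_neg hc]
        split
        · exact ih (k + 1) _ ⟨c', h, hbad⟩
        · exact ih (k + 1) _ ⟨c', h, hbad⟩

theorem loop_some (cs : List Char) :
    ∀ (suf : List Char) (k : Nat) (acc : List Char), cs.drop k = suf →
      (∀ c ∈ suf, PySem.Chars.isIn [c] "EFIRUY".toList = true) →
      faf_loop cs (PySem.List.enumerate suf (k : Int)) acc = some (acc ++ scanA suf) := by
  intro suf
  induction suf with
  | nil => intro k acc _ _; simp [faf_loop, PySem.List.enumerate, scanA]
  | cons c t ih =>
    intro k acc hcs hval
    have hslice : PySem.List.slice cs (some (k : Int)) (some ((k : Int) + 4)) = (c :: t).take 4 := by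
      rw [show ((k : Int) + 4) = ((k : Int) + ((4 : Nat) : Int)) by norm_num,
        PySem.List.slice_natCast_add, hcs]
    have hdrop : cs.drop (k + 1) = t := by
      have h1 := congrArg (List.drop 1) hcs
      rw [List.drop_drop] at h1
      simpa [Nat.add_comm] using h1
    have hcast : (k : Int) + 1 = ((k + 1 : Nat) : Int) := by push_cast; ring
    rw [PySem.List.enumerate_cons, faf_loop,
      if_neg (by rw [hval c (by simp)]; simp), hslice, hcast]
    rw [scanA]
    by_cases hm : (c :: t).take 4 = "FURY".toList ∨ (c :: t).take 4 = "FIRE".toList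
    · rw [if_pos hm, if_pos hm, ih (k + 1) _ hdrop (fun x hx => hval x (by simp [hx]))]
      simp
    · rw [if_neg hm, if_neg hm, ih (k + 1) _ hdrop (fun x hx => hval x (by simp [hx]))]
      simp

theorem scanA_eq_flat (l : List Char) : scanA l = flatTok (faf_tokenize l) := by
  have main : ∀ (N : Nat) (l : List Char), l.length ≤ N → scanA l = flatTok (faf_tokenize l) := by
    intro N
    induction N with
    | zero =>
      intro l h
      have hx : l = [] := by cases l with | nil => rfl | cons a b => simp at h
      subst hx
      rw [scanA, faf_tokenize]
      rfl
    | succ N ih =>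
      intro l hlen
      cases l with
      | nil =>
        rw [scanA, faf_tokenize]
        rfl
      | cons c t =>
        by_cases hm : (c :: t).take 4 = "FIRE".toList ∨ (c :: t).take 4 = "FURY".toList
        · have hm' : (c :: t).take 4 = "FURY".toList ∨ (c :: t).take 4 = "FIRE".toList :=
            hm.symm
          rw [faf_tokenize, if_pos hm, scanA, if_pos hm', flatTok]
          rcases hm with h4 | h4
          · obtain ⟨c1, c2, c3, r, h1, h2, h3, h0, hr⟩ :
                ∃ c1 c2 c3 r, c = 'F' ∧ c1 = 'I' ∧ c2 = 'R' ∧ c3 = 'E' ∧ t = c1 :: c2 :: c3 :: r := by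
              cases t with
              | nil => simp [tFIRE, cFIRE] at h4
              | cons a1 t1 =>
                cases t1 with
                | nil => simp [tFIRE, cFIRE] at h4
                | cons a2 t2 =>
                  cases t2 with
                  | nil => simp [tFIRE, cFIRE] at h4
                  | cons a3 t3 =>
                    simp [tFIRE, cFIRE] at h4
                    exact ⟨a1, a2, a3, t3, h4.1, h4.2.1, h4.2.2.1, h4.2.2.2, rfl⟩
            subst h1; subst h2; subst h3; subst h0; subst hr
            rw [show ('I' :: 'R' :: 'E' :: r).drop 3 = r from rfl]
            rw [scanA, if_neg (by simp [tFIRE, tFURY, cFIRE, cFURY, List.take]),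
              scanA, if_neg (by simp [tFIRE, tFURY, cFIRE, cFURY, List.take]),
              scanA, if_neg (by simp [tFIRE, tFURY, cFIRE, cFURY, List.take])]
            rw [ih r (by simp at hlen ⊢; omega)]
            simp
          · obtain ⟨c1, c2, c3, r, h1, h2, h3, h0, hr⟩ :
                ∃ c1 c2 c3 r, c = 'F' ∧ c1 = 'U' ∧ c2 = 'R' ∧ c3 = 'Y' ∧ t = c1 :: c2 :: c3 :: r := by
              cases t with
              | nil => simp [tFURY, cFURY] at h4
              | cons a1 t1 =>
                cases t1 with
                | nil => simp [tFURY, cFURY] at h4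
                | cons a2 t2 =>
                  cases t2 with
                  | nil => simp [tFURY, cFURY] at h4
                  | cons a3 t3 =>
                    simp [tFURY, cFURY] at h4
                    exact ⟨a1, a2, a3, t3, h4.1, h4.2.1, h4.2.2.1, h4.2.2.2, rfl⟩
            subst h1; subst h2; subst h3; subst h0; subst hr
            rw [show ('U' :: 'R' :: 'Y' :: r).drop 3 = r from rfl]
            rw [scanA, if_neg (by simp [tFIRE, tFURY, cFIRE, cFURY, List.take]),
              scanA, if_neg (by simp [tFIRE, tFURY, cFIRE, cFURY, List.take]),
              scanA, if_neg (by simp [tFIRE, tFURY, cFIRE, cFURY, List.take])]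
            rw [ih r (by simp at hlen ⊢; omega)]
            simp
        · have hm' : ¬ ((c :: t).take 4 = "FURY".toList ∨ (c :: t).take 4 = "FIRE".toList) :=
            fun h => hm h.symm
          rw [faf_tokenize, if_neg hm, scanA, if_neg hm', ih t (by simpa using hlen)]
          simp
  exact main l.length l le_rfl

-- ---- strip of the collected matches ----
theorem flatTok_eq_joinI (ts : List (List Char)) :
    flatTok ts = joinI (ts.map Itm.tok) ++ (if ts = [] then [] else [' ']) := by
  induction ts with
  | nil => rfl
  | cons t ts ih =>
    rw [flatTok, ih, List.map_cons, joinI_cons]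
    cases ts with
    | nil => simp [rend, joinI]
    | cons u ts' => simp [rend]

theorem strip_flat (ts : List (List Char)) (hts : ∀ t ∈ ts, t = cFIRE ∨ t = cFURY) (h : ts ≠ []) :
    PySem.Chars.strip (flatTok ts) = joinI (ts.map Itm.tok) := by
  have hlast : ∀ (us : List (List Char)), us ≠ [] → (∀ t ∈ us, t = cFIRE ∨ t = cFURY) →
      (joinI (us.map Itm.tok)).getLast? = some 'E' ∨ (joinI (us.map Itm.tok)).getLast? = some 'Y' := by
    intro us
    induction us with
    | nil => intro h; exact absurd rfl h
    | cons u us' ih =>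
      intro _ hwf
      cases us' with
      | nil =>
        rcases hwf u (by simp) with h | h <;> subst h <;>
          simp [joinI, rend, cFIRE, cFURY]
      | cons v vs =>
        rw [List.map_cons, joinI_cons, if_neg (by simp)]
        rw [List.getLast?_append]
        have hne : joinI ((v :: vs).map Itm.tok) ≠ [] := by
          rcases hwf v (by simp) with h | h <;>
            rw [List.map_cons, joinI_cons] <;> subst h <;> simp [rend, cFIRE, cFURY]
        have : (' ' :: joinI ((v :: vs).map Itm.tok)).getLast? =
            (joinI ((v :: vs).map Itm.tok)).getLast? := by
          cases hj : joinI ((v :: vs).map Itm.tok) with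
          | nil => exact absurd hj hne
          | cons a l => rw [List.getLast?_cons_cons]
        rw [this]
        rcases ih (by simp) (fun x hx => hwf x (by simp [hx])) with h | h <;>
          [left; right] <;> rw [h] <;> rfl
  rw [flatTok_eq_joinI, if_neg h]
  obtain ⟨t, ts', rfl⟩ : ∃ t ts', ts = t :: ts' := by
    cases ts with
    | nil => exact absurd rfl h
    | cons t ts' => exact ⟨t, ts', rfl⟩
  obtain ⟨J, hJ⟩ : ∃ J, joinI ((t :: ts').map Itm.tok) = 'F' :: J := by
    rcases hts t (by simp) with h1 | h1 <;> rw [List.map_cons, joinI_cons] <;> subst h1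
    · exact ⟨'I' :: 'R' :: 'E' ::
        (if (ts'.map Itm.tok) = [] then [] else ' ' :: joinI (ts'.map Itm.tok)),
        by simp [rend, cFIRE]⟩
    · exact ⟨'U' :: 'R' :: 'Y' ::
        (if (ts'.map Itm.tok) = [] then [] else ' ' :: joinI (ts'.map Itm.tok)),
        by simp [rend, cFURY]⟩
  rw [hJ]
  rw [PySem.Chars.strip, PySem.Chars.lstrip,
    show ('F' :: J) ++ [' '] = 'F' :: (J ++ [' ']) from rfl,
    List.dropWhile_cons_of_neg (by decide)]
  rw [PySem.Chars.rstrip]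
  rw [show ('F' :: (J ++ [' '])).reverse = ' ' :: ('F' :: J).reverse from by simp]
  rw [List.dropWhile_cons_of_pos (by decide)]
  have hrev : ∀ (c : Char), ('F' :: J).getLast? = some c → PySem.Chars.isspace c = false →
      List.dropWhile PySem.Chars.isspace (('F' :: J).reverse) = ('F' :: J).reverse := by
    intro c hc hsp
    cases hr : ('F' :: J).reverse with
    | nil => simp at hr
    | cons a l =>
      have ha : a = c := by
        have h2 := List.head?_reverse (l := 'F' :: J)
        rw [hr, hc] at h2
        simpa using h2
      rw [List.dropWhile_cons_of_neg (by rw [ha, hsp]; simp)]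
  rcases hlast (t :: ts') (by simp) hts with hl | hl
  · rw [hJ] at hl
    rw [hrev 'E' hl (by decide)]
    simp
  · rw [hJ] at hl
    rw [hrev 'Y' hl (by decide)]
    simp

theorem wf_tokenize (l : List Char) : ∀ t ∈ faf_tokenize l, t = cFIRE ∨ t = cFURY := by
  have main : ∀ (N : Nat) (l : List Char), l.length ≤ N →
      ∀ t ∈ faf_tokenize l, t = cFIRE ∨ t = cFURY := by
    intro N
    induction N with
    | zero =>
      intro l h
      have hx : l = [] := by cases l with | nil => rfl | cons a b => simp at h
      subst hx
      simp [faf_tokenize]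
    | succ N ih =>
      intro l hlen
      cases l with
      | nil => simp [faf_tokenize]
      | cons c t =>
        by_cases hm : (c :: t).take 4 = "FIRE".toList ∨ (c :: t).take 4 = "FURY".toList
        · rw [faf_tokenize, if_pos hm]
          intro x hx
          rcases List.mem_cons.mp hx with h | h
          · subst h; rcases hm with h | h <;> rw [h] <;> simp [tFIRE, tFURY]
          · exact ih (t.drop 3) (by simp at hlen ⊢; omega) x h
        · rw [faf_tokenize, if_neg hm]
          exact ih t (by simpa using hlen)
  exact main l.length l le_rfl

theorem joinI_eng (l : List (List Char)) :
    joinI (l.map Itm.eng) = PySem.Chars.join [' '] l := by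
  induction l with
  | nil => rfl
  | cons x xs ih =>
    cases xs with
    | nil => simp [joinI, rend, PySem.Chars.join, List.intercalate]
    | cons y ys =>
      rw [List.map_cons, joinI_cons, if_neg (by simp), ih]
      rw [show PySem.Chars.join [' '] (x :: y :: ys) =
          x ++ ' ' :: PySem.Chars.join [' '] (y :: ys) from by
        simp [PySem.Chars.join, List.intercalate, List.intersperse]]
      simp [rend]

theorem A_none (tw : String)
    (h : faf_loop tw.toList (PySem.List.enumerate tw.toList 0) [] = none) :
    fire_and_fury tw = "Fake tweet." := by
  unfold fire_and_fury
  rw [h]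

theorem A_some (tw : String) (x : List Char)
    (h : faf_loop tw.toList (PySem.List.enumerate tw.toList 0) [] = some x) :
    fire_and_fury tw =
      (if PySem.Chars.strip x ≠ [] then
        String.ofList (PySem.Chars.replace (PySem.Chars.replace (PySem.Chars.replace
          (PySem.Chars.replace (PySem.Chars.replace
            (if PySem.Chars.isIn "FIRE FIRE FIRE".toList (PySem.Chars.strip x) then
              PySem.Chars.replace (PySem.Chars.strip x) "FIRE FIRE FIRE".toList
                "You and you and you are fired!".toList
             else PySem.Chars.strip x)
            "FIRE FIRE".toList "You and you are fired!".toList)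
            "FIRE".toList "You are fired!".toList)
            "FURY FURY FURY".toList "I am really really furious.".toList)
            "FURY FURY".toList "I am really furious.".toList)
            "FURY".toList "I am furious.".toList)
      else "Fake tweet.") := by
  unfold fire_and_fury
  rw [h]

-- ===== VERDICT (by name: the statement is the Claim_ definition above) =====
theorem fire_and_fury_spec : Claim_equal_fire_and_fury := by
  intro tweet _
  unfold Spec_fire_and_fury fire_and_fury_alt
  by_cases hv : ∃ c ∈ tweet.toList, PySem.Chars.isIn [c] "EFIRUY".toList = false
  · rw [A_none tweet (loop_none tweet.toList tweet.toList 0 [] hv)]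
    rw [if_pos (show faf_valid tweet.toList = true from by
      simp only [faf_valid, List.any_eq_true]
      obtain ⟨c, hc, hb⟩ := hv
      exact ⟨c, hc, by rw [hb]; rfl⟩)]
  · have hval : ∀ c ∈ tweet.toList, PySem.Chars.isIn [c] "EFIRUY".toList = true := by
      intro c hc
      cases hb : PySem.Chars.isIn [c] "EFIRUY".toList with
      | false => exact absurd ⟨c, hc, hb⟩ hv
      | true => rfl
    have hloop := loop_some tweet.toList tweet.toList 0 [] (by simp) hval
    rw [show ((0 : Nat) : Int) = (0 : Int) from rfl] at hloop
    simp only [List.nil_append] at hloop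
    rw [A_some tweet (scanA tweet.toList) hloop]
    rw [if_neg (show ¬ faf_valid tweet.toList = true from by
      simp only [faf_valid, List.any_eq_true]
      rintro ⟨c, hc, hb⟩
      rw [hval c hc] at hb
      simp at hb)]
    rw [scanA_eq_flat]
    have hwf := wf_tokenize tweet.toList
    by_cases h0 : faf_tokenize tweet.toList = []
    · rw [h0, show PySem.Chars.strip (flatTok []) = [] from by decide]
      simp
    · rw [strip_flat (faf_tokenize tweet.toList) hwf h0]
      have hct : joinI ((faf_tokenize tweet.toList).map Itm.tok) ≠ [] := by
        obtain ⟨t, ts', heq⟩ : ∃ t ts', faf_tokenize tweet.toList = t :: ts' := by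
          cases hq : faf_tokenize tweet.toList with
          | nil => exact absurd hq h0
          | cons t ts' => exact ⟨t, ts', rfl⟩
        rw [heq, List.map_cons, joinI_cons]
        rcases hwf t (by rw [heq]; simp) with h | h <;> subst h <;>
          simp [rend, cFIRE, cFURY]
      rw [if_pos hct, if_neg h0]
      have hg : (if PySem.Chars.isIn "FIRE FIRE FIRE".toList
            (joinI ((faf_tokenize tweet.toList).map Itm.tok)) then
          PySem.Chars.replace (joinI ((faf_tokenize tweet.toList).map Itm.tok))
            "FIRE FIRE FIRE".toList "You and you and you are fired!".toList
        else joinI ((faf_tokenize tweet.toList).map Itm.tok)) =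
          rep (patN cFIRE 3) eF3 (joinI ((faf_tokenize tweet.toList).map Itm.tok)) := by
        by_cases hin : PySem.Chars.isIn "FIRE FIRE FIRE".toList
            (joinI ((faf_tokenize tweet.toList).map Itm.tok)) = true
        · rw [if_pos hin, replace_eq_rep _ _ _ (by decide),
            show "FIRE FIRE FIRE".toList = patN cFIRE 3 from by decide]
          rfl
        · rw [if_neg hin]
          have hninf : ¬ "FIRE FIRE FIRE".toList <:+:
              joinI ((faf_tokenize tweet.toList).map Itm.tok) :=
            (PySem.Chars.isIn_eq_false_iff _ _).mp (by
              cases hq : PySem.Chars.isIn "FIRE FIRE FIRE".toList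
                  (joinI ((faf_tokenize tweet.toList).map Itm.tok)) with
              | false => rfl
              | true => exact absurd hq hin)
          exact (rep_id _ _ _ (by
            rw [show patN cFIRE 3 = "FIRE FIRE FIRE".toList from by decide]
            exact hninf)).symm
      rw [hg]
      rw [replace_eq_rep "FIRE FIRE".toList "You and you are fired!".toList _ (by decide),
        replace_eq_rep "FIRE".toList "You are fired!".toList _ (by decide),
        replace_eq_rep "FURY FURY FURY".toList "I am really really furious.".toList _ (by decide),
        replace_eq_rep "FURY FURY".toList "I am really furious.".toList _ (by decide),
        replace_eq_rep "FURY".toList "I am furious.".toList _ (by decide)]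
      rw [show "FIRE FIRE".toList = patN cFIRE 2 from by decide,
        show "FIRE".toList = patN cFIRE 1 from by decide,
        show "FURY FURY FURY".toList = patN cFURY 3 from by decide,
        show "FURY FURY".toList = patN cFURY 2 from by decide,
        show "FURY".toList = patN cFURY 1 from by decide,
        show "You and you are fired!".toList = eF2 from rfl,
        show "You are fired!".toList = eF1 from rfl,
        show "I am really really furious.".toList = eU3 from rfl,
        show "I am really furious.".toList = eU2 from rfl,
        show "I am furious.".toList = eU1 from rfl]
      have w0 : ∀ x ∈ (faf_tokenize tweet.toList).map Itm.tok, wfI x := by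
        intro x hx
        obtain ⟨t, ht, rfl⟩ := List.mem_map.mp hx
        exact hwf t ht
      have w1 := wf_passI (.tok cFIRE) 3 eF3 (by decide) _ w0
      have w2 := wf_passI (.tok cFIRE) 2 eF2 (by decide) _ w1
      have w3 := wf_passI (.tok cFIRE) 1 eF1 (by decide) _ w2
      have w4 := wf_passI (.tok cFURY) 3 eU3 (by decide) _ w3
      have w5 := wf_passI (.tok cFURY) 2 eU2 (by decide) _ w4
      rw [pass_correct cFIRE (Or.inl rfl) 3 (by omega) eF3 _ w0,
        pass_correct cFIRE (Or.inl rfl) 2 (by omega) eF2 _ w1,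
        pass_correct cFIRE (Or.inl rfl) 1 (by omega) eF1 _ w2,
        pass_correct cFURY (Or.inr rfl) 3 (by omega) eU3 _ w3,
        pass_correct cFURY (Or.inr rfl) 2 (by omega) eU2 _ w4,
        pass_correct cFURY (Or.inr rfl) 1 (by omega) eU1 _ w5]
      rw [show passI (Itm.tok cFURY) 1 eU1 (passI (Itm.tok cFURY) 2 eU2
          (passI (Itm.tok cFURY) 3 eU3 (passI (Itm.tok cFIRE) 1 eF1
            (passI (Itm.tok cFIRE) 2 eF2 (passI (Itm.tok cFIRE) 3 eF3
              ((faf_tokenize tweet.toList).map Itm.tok)))))) =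
          chainI ((faf_tokenize tweet.toList).map Itm.tok) from rfl]
      rw [chain_run (faf_tokenize tweet.toList) hwf, joinI_eng]
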